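-- pv_equiv track=rewrite | github.com/neevshaw/UpLevel-Ops-Projects | Legal Assessment/lambda_package/src/app/services/current_state_baseline.py | _filter_chunks
-- ===== SOURCE A (Python) =====
-- from typing import Dict, List, Tuple
--
-- def _text(ch: Dict) -> str:
--     return (ch.get("text") or "")[:4000]
--
-- def _filter_chunks(chunks: List[Dict], keywords: List[str]) -> List[Dict]:
--     if not keywords:
--         return chunks
--     kw = [k.lower() for k in keywords]
--     out = []
--     for ch in chunks:
--         t = _text(ch).lower()
--         if any(k in t for k in kw):
--             out.append(ch)
--     # fallback to all if filter too strict
--     return out if out else chunks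
-- ===== SOURCE B (Python) =====
-- from typing import Dict, List
--
-- def _filter_chunks(chunks: List[Dict], keywords: List[str]) -> List[Dict]:
--     if not keywords:
--         return chunks
--     # lowercase each chunk's (truncated) text once, up front
--     texts = [((ch.get("text") or "")[:4000]).lower() for ch in chunks]
--     hit = set()
--     for k in keywords:
--         kl = k.lower()
--         for i, t in enumerate(texts):
--             if i not in hit and kl in t:
--                 hit.add(i)
--     out = [ch for i, ch in enumerate(chunks) if i in hit]
--     return out if out else chunks
-- ===== Notes on version B (the rewrite author's own statement) =====
-- stated objective: alternative
-- what changed: B inverts the loop nesting: it precomputes each chunk's lowercased truncated text once, then for each keyword marks matching chunk indices in a set, and finally emits chunks whose index was marked, instead of A's per-chunk any-keyword substring scan.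
import Mathlib
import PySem

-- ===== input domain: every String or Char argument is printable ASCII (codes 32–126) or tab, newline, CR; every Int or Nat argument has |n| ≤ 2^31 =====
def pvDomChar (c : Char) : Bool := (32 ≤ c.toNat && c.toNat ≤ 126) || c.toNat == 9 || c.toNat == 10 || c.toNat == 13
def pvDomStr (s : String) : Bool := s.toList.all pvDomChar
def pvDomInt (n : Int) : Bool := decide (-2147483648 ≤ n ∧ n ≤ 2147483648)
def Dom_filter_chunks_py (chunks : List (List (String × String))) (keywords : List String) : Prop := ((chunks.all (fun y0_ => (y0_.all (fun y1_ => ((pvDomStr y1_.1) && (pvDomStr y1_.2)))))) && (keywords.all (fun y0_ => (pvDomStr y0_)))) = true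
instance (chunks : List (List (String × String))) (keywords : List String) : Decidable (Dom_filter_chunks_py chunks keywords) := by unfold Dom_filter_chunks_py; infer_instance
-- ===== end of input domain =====

-- B replaces the per-chunk "any keyword in text" scan by a keyword-outer pass that marks
-- matching chunk indices in a set over once-precomputed lowercased texts (objective: alternative).

-- shared text helper: (ch.get("text") or "")[:4000], on List Char
-- ('or ""' yields "" exactly when get returns None or "", which getD "" also yields)
def pvText (ch : List (String × String)) : List Char :=
  PySem.List.slice (((PySem.Dict.mk ch).get? "text").getD "").toList none (some 4000)

-- ===== PORT A =====
def filter_chunks_py (chunks : List (List (String × String))) (keywords : List String) : List (List (String × String)) :=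
  if keywords = [] then chunks else
  let kw := keywords.map (fun k => PySem.Chars.lower k.toList)
  let out := chunks.foldl (fun out ch =>
      let t := PySem.Chars.lower (pvText ch)
      if kw.any (fun k => PySem.Chars.isIn k t) then out ++ [ch] else out) []
  if out = [] then chunks else out

-- ===== PORT B =====
def filter_chunks_py_alt (chunks : List (List (String × String))) (keywords : List String) : List (List (String × String)) :=
  if keywords = [] then chunks else
  let texts := chunks.map (fun ch => PySem.Chars.lower (pvText ch))
  let hit := keywords.foldl (fun h k =>
      let kl := PySem.Chars.lower k.toList
      (PySem.List.enumerate texts 0).foldl (fun h p =>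
          if (!PySem.Set.contains h p.1) && PySem.Chars.isIn kl p.2 then PySem.Set.add h p.1 else h) h)
    (PySem.Set.empty : PySem.Set Int)
  let out := ((PySem.List.enumerate chunks 0).filter (fun p => PySem.Set.contains hit p.1)).map (·.2)
  if out = [] then chunks else out

-- ===== PRECONDITION & SPEC =====
def Spec_filter_chunks_py (chunks : List (List (String × String))) (keywords : List String) (out : List (List (String × String))) : Prop := out = filter_chunks_py_alt chunks keywords
instance (chunks : List (List (String × String))) (keywords : List String) (out : List (List (String × String))) : Decidable (Spec_filter_chunks_py chunks keywords out) := by unfold Spec_filter_chunks_py; infer_instance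

-- ===== CLAIM (what is proved, stated in full; the proofs are below) =====
def Claim_equal_filter_chunks_py : Prop := ∀ (chunks : List (List (String × String))) (keywords : List String), Dom_filter_chunks_py chunks keywords → Spec_filter_chunks_py chunks keywords (filter_chunks_py chunks keywords)

-- ===== LEMMAS AND PROOFS =====

-- inner loop of B: membership in the set after one keyword's pass
lemma pv_inner_mem (kl : List Char) (texts : List (List Char)) :
    ∀ (s : Int) (h : PySem.Set Int) (j : Int),
    j ∈ (PySem.List.enumerate texts s).foldl (fun h p =>
          if (!PySem.Set.contains h p.1) && PySem.Chars.isIn kl p.2 then PySem.Set.add h p.1 else h) h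
      ↔ j ∈ h ∨ ∃ p ∈ PySem.List.enumerate texts s, p.1 = j ∧ PySem.Chars.isIn kl p.2 := by
  induction texts with
  | nil => intro s h j; simp [PySem.List.enumerate_nil]
  | cons t ts ih =>
    intro s h j
    rw [PySem.List.enumerate_cons]
    simp only [List.foldl_cons]
    by_cases hc : ((!PySem.Set.contains h s) && PySem.Chars.isIn kl t) = true
    · simp only [hc, if_pos]
      rw [ih]
      simp only [PySem.Set.mem_add, List.mem_cons]
      simp only [Bool.and_eq_true] at hc
      constructor
      · rintro (⟨hj | rfl⟩ | ⟨p, hp, h1, h2⟩)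
        · exact Or.inl hj
        · exact Or.inr ⟨(j, t), Or.inl rfl, rfl, hc.2⟩
        · exact Or.inr ⟨p, Or.inr hp, h1, h2⟩
      · rintro (hj | ⟨p, hp | hp, h1, h2⟩)
        · exact Or.inl (Or.inl hj)
        · subst hp; exact Or.inl (Or.inr h1.symm)
        · exact Or.inr ⟨p, hp, h1, h2⟩
    · simp only [hc, if_neg, Bool.not_eq_true]
      rw [ih]
      simp only [List.mem_cons]
      constructor
      · rintro (hj | ⟨p, hp, h1, h2⟩)
        · exact Or.inl hj
        · exact Or.inr ⟨p, Or.inr hp, h1, h2⟩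
      · rintro (hj | ⟨p, hp | hp, h1, h2⟩)
        · exact Or.inl hj
        · subst hp
          simp only at h1 h2
          by_cases hm : s ∈ h
          · exact Or.inl (h1 ▸ hm)
          · exact absurd (by simp [h2, hm]) hc
        · exact Or.inr ⟨p, hp, h1, h2⟩
  -- end

-- outer loop of B over the keywords
lemma pv_hit_mem (keywords : List String) (texts : List (List Char)) :
    ∀ (h : PySem.Set Int) (j : Int),
    j ∈ keywords.foldl (fun h k =>
        (PySem.List.enumerate texts 0).foldl (fun h p =>
            if (!PySem.Set.contains h p.1) && PySem.Chars.isIn (PySem.Chars.lower k.toList) p.2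
            then PySem.Set.add h p.1 else h) h) h
      ↔ j ∈ h ∨ ∃ k ∈ keywords, ∃ p ∈ PySem.List.enumerate texts 0,
          p.1 = j ∧ PySem.Chars.isIn (PySem.Chars.lower k.toList) p.2 := by
  induction keywords with
  | nil => intro h j; simp
  | cons k ks ih =>
    intro h j
    simp only [List.foldl_cons]
    rw [ih, pv_inner_mem]
    simp only [List.mem_cons]
    constructor
    · rintro (⟨hj | hj⟩ | ⟨k', hk', rest⟩)
      · exact Or.inl hj
      · exact Or.inr ⟨k, Or.inl rfl, hj⟩
      · exact Or.inr ⟨k', Or.inr hk', rest⟩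
    · rintro (hj | ⟨k', hk' | hk', rest⟩)
      · exact Or.inl (Or.inl hj)
      · subst hk'; exact Or.inl (Or.inr rest)
      · exact Or.inr ⟨k', hk', rest⟩

-- enumerate of a mapped list
lemma pv_enumerate_map {α β : Type} (f : α → β) (xs : List α) :
    ∀ s : Int, PySem.List.enumerate (xs.map f) s
      = (PySem.List.enumerate xs s).map (fun p => (p.1, f p.2)) := by
  induction xs with
  | nil => intro s; simp [PySem.List.enumerate_nil]
  | cons x xs ih => intro s; simp [PySem.List.enumerate_cons, ih]

-- first components of enumerate are at least the start
lemma pv_enumerate_fst_ge {α : Type} (xs : List α) :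
    ∀ (s : Int) (p : Int × α), p ∈ PySem.List.enumerate xs s → s ≤ p.1 := by
  induction xs with
  | nil => intro s p hp; simp [PySem.List.enumerate_nil] at hp
  | cons x xs ih =>
    intro s p hp
    rw [PySem.List.enumerate_cons] at hp
    rcases List.mem_cons.mp hp with rfl | hp
    · exact le_refl _
    · have := ih (s + 1) p hp; omega

-- an index determines its element in enumerate
lemma pv_enumerate_inj {α : Type} (xs : List α) :
    ∀ (s : Int) (p q : Int × α), p ∈ PySem.List.enumerate xs s → q ∈ PySem.List.enumerate xs s →
      p.1 = q.1 → p = q := by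
  induction xs with
  | nil => intro s p q hp; simp [PySem.List.enumerate_nil] at hp
  | cons x xs ih =>
    intro s p q hp hq hfst
    rw [PySem.List.enumerate_cons] at hp hq
    rcases List.mem_cons.mp hp with rfl | hp <;> rcases List.mem_cons.mp hq with rfl | hq
    · rfl
    · exfalso; have := pv_enumerate_fst_ge xs (s + 1) q hq; omega
    · exfalso; have := pv_enumerate_fst_ge xs (s + 1) p hp; omega
    · exact ih (s + 1) p q hp hq hfst

-- B's final comprehension over enumerate collapses to a plain filter
lemma pv_filter_enumerate {α : Type} (xs : List α) :
    ∀ (s : Int) (G : Int → Bool) (q : α → Bool),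
    (∀ p ∈ PySem.List.enumerate xs s, G p.1 = q p.2) →
    ((PySem.List.enumerate xs s).filter (fun p => G p.1)).map (·.2) = xs.filter q := by
  induction xs with
  | nil => intro s G q _; simp [PySem.List.enumerate_nil]
  | cons x xs ih =>
    intro s G q hGq
    rw [PySem.List.enumerate_cons]
    have hx : G s = q x := hGq (s, x) (by simp [PySem.List.enumerate_cons])
    have hrest := ih (s + 1) G q (fun p hp => hGq p (by rw [PySem.List.enumerate_cons]; exact List.mem_cons_of_mem _ hp))
    by_cases hq : q x = true
    · simp [hx, hq, hrest]
    · simp [hx, eq_false_of_ne_true hq, hrest]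

-- ===== VERDICT (by name: the statement is the Claim_ definition above) =====
theorem filter_chunks_py_spec : Claim_equal_filter_chunks_py := by
  intro chunks keywords _
  unfold Spec_filter_chunks_py filter_chunks_py filter_chunks_py_alt
  by_cases hk : keywords = []
  · simp [hk]
  · simp only [hk, if_false]
    rw [PySem.List.foldl_append_if_eq_filter
      (p := fun ch => (keywords.map (fun k => PySem.Chars.lower k.toList)).any
        (fun k => PySem.Chars.isIn k (PySem.Chars.lower (pvText ch))))]
    have hGq : ∀ p ∈ PySem.List.enumerate chunks 0,
        (keywords.foldl (fun h k =>
          (PySem.List.enumerate (chunks.map (fun ch => PySem.Chars.lower (pvText ch))) 0).foldl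
            (fun h p => if (!PySem.Set.contains h p.1) && PySem.Chars.isIn (PySem.Chars.lower k.toList) p.2
              then PySem.Set.add h p.1 else h) h) (PySem.Set.empty : PySem.Set Int)).contains p.1
        = (keywords.map (fun k => PySem.Chars.lower k.toList)).any
            (fun k => PySem.Chars.isIn k (PySem.Chars.lower (pvText p.2))) := by
      intro p hp
      rw [Bool.eq_iff_iff, PySem.Set.contains_iff, pv_hit_mem]
      simp only [PySem.Set.empty, List.not_mem_nil, false_or, List.any_eq_true, List.mem_map]
      constructor
      · rintro ⟨k, hk', pt, hpt, h1, h2⟩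
        rw [pv_enumerate_map] at hpt
        rcases List.mem_map.mp hpt with ⟨p', hp', hpp⟩
        have : p' = p := pv_enumerate_inj chunks 0 p' p hp' hp (by rw [← h1, ← hpp])
        subst this
        exact ⟨_, ⟨k, hk', rfl⟩, by rw [← hpp] at h2; exact h2⟩
      · rintro ⟨kl, ⟨k, hk', rfl⟩, hIn⟩
        refine ⟨k, hk', (p.1, PySem.Chars.lower (pvText p.2)), ?_, rfl, hIn⟩
        rw [pv_enumerate_map]
        exact List.mem_map.mpr ⟨p, hp, rfl⟩
    rw [pv_filter_enumerate chunks 0 _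
      (fun ch => (keywords.map (fun k => PySem.Chars.lower k.toList)).any
        (fun k => PySem.Chars.isIn k (PySem.Chars.lower (pvText ch)))) hGq]
    simp
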